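-- pv_equiv track=rewrite | github.com/Anish17-Shanu/Dreams-into-Reality | dashboard/routes.py | _subject_pack_keys_for_task
-- ===== SOURCE A (Python) =====
-- def _subject_pack_keys_for_task(task_markers):
--     keys = []
--     if {"strategy", "foundation"} & task_markers:
--         keys.append("foundation")
--     if {"prelims", "polity", "history", "geography", "economy", "environment", "science", "pyq"} & task_markers:
--         keys.append("prelims_gs")
--     if "csat" in task_markers:
--         keys.append("csat")
--     if "essay" in task_markers:
--         keys.append("essay")
--     if {"history", "geography", "society"} & task_markers:
--         keys.append("gs1")
--     if {"polity", "governance", "international relations", "social justice"} & task_markers: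
--         keys.append("gs2")
--     if {"economy", "environment", "science", "technology"} & task_markers:
--         keys.append("gs3")
--     if "ethics" in task_markers:
--         keys.append("gs4")
--     if {"answer writing", "mains"} & task_markers:
--         keys.append("answer_writing")
--     if "interview" in task_markers:
--         keys.append("interview")
--     if "optional" in task_markers:
--         keys.append("optional")
--
--     unique = []
--     seen = set()
--     for key in keys:
--         if key not in seen:
--             seen.add(key)
--             unique.append(key)
--     return unique
-- ===== SOURCE B (Python) =====
-- # Inverted index: marker -> pack keys it triggers; one pass over the input
-- # markers collects the triggered packs, then they are emitted in canonical order.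
-- _MARKER_TO_PACKS = {
--     "strategy": ("foundation",),
--     "foundation": ("foundation",),
--     "prelims": ("prelims_gs",),
--     "polity": ("prelims_gs", "gs2"),
--     "history": ("prelims_gs", "gs1"),
--     "geography": ("prelims_gs", "gs1"),
--     "economy": ("prelims_gs", "gs3"),
--     "environment": ("prelims_gs", "gs3"),
--     "science": ("prelims_gs", "gs3"),
--     "pyq": ("prelims_gs",),
--     "csat": ("csat",),
--     "essay": ("essay",),
--     "society": ("gs1",),
--     "governance": ("gs2",),
--     "international relations": ("gs2",),
--     "social justice": ("gs2",),
--     "technology": ("gs3",),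
--     "ethics": ("gs4",),
--     "answer writing": ("answer_writing",),
--     "mains": ("answer_writing",),
--     "interview": ("interview",),
--     "optional": ("optional",),
-- }
--
-- _PACK_ORDER = ["foundation", "prelims_gs", "csat", "essay", "gs1", "gs2",
--                "gs3", "gs4", "answer_writing", "interview", "optional"]
--
--
-- def _subject_pack_keys_for_task(task_markers):
--     hit = set()
--     for m in task_markers:
--         hit.update(_MARKER_TO_PACKS.get(m, ()))
--     return [k for k in _PACK_ORDER if k in hit]
-- ===== Notes on version B (the rewrite author's own statement) =====
-- stated objective: alternative
-- what changed: Replaces the eleven if/append branches over trigger sets plus an explicit seen-set dedup loop by an inverted marker-to-packs index: a single pass over the input markers collects the triggered pack keys into a set, which is then emitted filtered through the canonical pack order; the dedup pass disappears.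
import Mathlib
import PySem

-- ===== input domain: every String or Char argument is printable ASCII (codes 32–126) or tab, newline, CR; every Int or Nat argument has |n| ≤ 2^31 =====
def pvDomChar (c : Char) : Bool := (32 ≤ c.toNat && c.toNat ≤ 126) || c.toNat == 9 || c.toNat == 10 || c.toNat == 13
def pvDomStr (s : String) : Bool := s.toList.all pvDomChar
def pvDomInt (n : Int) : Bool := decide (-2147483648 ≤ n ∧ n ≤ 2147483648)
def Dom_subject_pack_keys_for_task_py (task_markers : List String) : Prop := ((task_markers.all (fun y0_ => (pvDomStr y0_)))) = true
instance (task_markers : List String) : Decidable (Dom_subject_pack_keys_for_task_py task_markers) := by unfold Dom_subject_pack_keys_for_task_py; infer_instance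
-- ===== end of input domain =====

-- B replaces A's eleven trigger-set if/append branches plus a seen-set dedup loop by an
-- inverted marker→packs index consulted in one pass over the input, emitted in canonical pack order.
-- ===== PORT A =====
-- task_markers is a Python set (distinct elements); '{...} & task_markers' (truthy) is 'Set.inter ... ≠ []'.
def subject_pack_keys_for_task_py (task_markers : List String) : List String :=
  let keys : List String := []
  let keys := keys ++ (if PySem.Set.inter ["strategy", "foundation"] task_markers ≠ [] then ["foundation"] else [])
  let keys := keys ++ (if PySem.Set.inter ["prelims", "polity", "history", "geography", "economy", "environment", "science", "pyq"] task_markers ≠ [] then ["prelims_gs"] else [])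
  let keys := keys ++ (if task_markers.contains "csat" then ["csat"] else [])
  let keys := keys ++ (if task_markers.contains "essay" then ["essay"] else [])
  let keys := keys ++ (if PySem.Set.inter ["history", "geography", "society"] task_markers ≠ [] then ["gs1"] else [])
  let keys := keys ++ (if PySem.Set.inter ["polity", "governance", "international relations", "social justice"] task_markers ≠ [] then ["gs2"] else [])
  let keys := keys ++ (if PySem.Set.inter ["economy", "environment", "science", "technology"] task_markers ≠ [] then ["gs3"] else [])
  let keys := keys ++ (if task_markers.contains "ethics" then ["gs4"] else [])
  let keys := keys ++ (if PySem.Set.inter ["answer writing", "mains"] task_markers ≠ [] then ["answer_writing"] else [])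
  let keys := keys ++ (if task_markers.contains "interview" then ["interview"] else [])
  let keys := keys ++ (if task_markers.contains "optional" then ["optional"] else [])
  -- the dedup loop: unique/seen accumulator pair
  (keys.foldl
    (fun (acc : List String × PySem.Set String) key =>
      if acc.2.contains key then acc else (acc.1 ++ [key], acc.2.add key))
    ([], PySem.Set.empty)).1

-- ===== PORT B =====
def pvIndexList : List (String × List String) :=
  [("strategy", ["foundation"]), ("foundation", ["foundation"]), ("prelims", ["prelims_gs"]),
   ("polity", ["prelims_gs", "gs2"]), ("history", ["prelims_gs", "gs1"]),
   ("geography", ["prelims_gs", "gs1"]), ("economy", ["prelims_gs", "gs3"]),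
   ("environment", ["prelims_gs", "gs3"]), ("science", ["prelims_gs", "gs3"]),
   ("pyq", ["prelims_gs"]), ("csat", ["csat"]), ("essay", ["essay"]), ("society", ["gs1"]),
   ("governance", ["gs2"]), ("international relations", ["gs2"]), ("social justice", ["gs2"]),
   ("technology", ["gs3"]), ("ethics", ["gs4"]), ("answer writing", ["answer_writing"]),
   ("mains", ["answer_writing"]), ("interview", ["interview"]), ("optional", ["optional"])]

-- the dict literal _MARKER_TO_PACKS (all keys distinct)
def pvMarkerIndex : PySem.Dict String (List String) := PySem.Dict.mk pvIndexList

def pvPackOrder : List String :=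
  ["foundation", "prelims_gs", "csat", "essay", "gs1", "gs2",
   "gs3", "gs4", "answer_writing", "interview", "optional"]

def subject_pack_keys_for_task_py_alt (task_markers : List String) : List String :=
  -- hit = set(); for m in task_markers: hit.update(index.get(m, ()))
  let hit : PySem.Set String :=
    task_markers.foldl (fun s m => PySem.Set.update s (pvMarkerIndex.getD m [])) PySem.Set.empty
  pvPackOrder.filter (fun k => hit.contains k)

-- ===== PRECONDITION & SPEC =====
def Spec_subject_pack_keys_for_task_py (task_markers : List String) (out : List String) : Prop := out = subject_pack_keys_for_task_py_alt task_markers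
instance (task_markers : List String) (out : List String) : Decidable (Spec_subject_pack_keys_for_task_py task_markers out) := by unfold Spec_subject_pack_keys_for_task_py; infer_instance

-- ===== CLAIM (what is proved, stated in full; the proofs are below) =====
def Claim_equal_subject_pack_keys_for_task_py : Prop := ∀ (task_markers : List String), Dom_subject_pack_keys_for_task_py task_markers → Spec_subject_pack_keys_for_task_py task_markers (subject_pack_keys_for_task_py task_markers)

-- ===== LEMMAS AND PROOFS =====
theorem pv_any_comm (a b : List String) :
    (a.any (fun x => b.contains x)) = (b.any (fun x => a.contains x)) := by
  apply Bool.eq_iff_iff.mpr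
  simp only [List.any_eq_true, List.contains_iff_mem]
  exact ⟨fun ⟨x, h1, h2⟩ => ⟨x, h2, h1⟩, fun ⟨x, h1, h2⟩ => ⟨x, h2, h1⟩⟩

theorem pv_inter_cond (l tm : List String) :
    (¬ (PySem.Set.inter l tm = [])) ↔ (tm.any (fun m => l.contains m) = true) := by
  rw [← pv_any_comm]
  simp [PySem.Set.inter, List.filter_eq_nil_iff, List.any_eq_true]

theorem pv_ite_cond {α : Type} (l tm : List String) (a b : α) :
    (if PySem.Set.inter l tm ≠ [] then a else b)
      = (if tm.any (fun m => l.contains m) then a else b) :=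
  if_congr (pv_inter_cond l tm) rfl rfl

theorem pv_any_singleton (tm : List String) (x : String) :
    (tm.any (fun m => ([x] : List String).contains m)) = tm.contains x := by
  apply Bool.eq_iff_iff.mpr
  simp [List.any_eq_true]

-- membership after Set.update (fold of add)
theorem pv_update_contains (l : List String) (s : PySem.Set String) (k : String) :
    (PySem.Set.update s l).contains k = (s.contains k || l.contains k) := by
  induction l generalizing s with
  | nil => simp [PySem.Set.update]
  | cons x xs ih =>
      simp only [PySem.Set.update, List.foldl_cons] at *
      rw [ih]
      apply Bool.eq_iff_iff.mpr
      simp only [PySem.Set.contains, Bool.or_eq_true, List.contains_iff_mem,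
        PySem.Set.mem_add, List.mem_cons]
      tauto

-- membership in the hit set built by B's fold
theorem pv_hit_contains (tm : List String) (s : PySem.Set String) (k : String) :
    ((tm.foldl (fun s m => PySem.Set.update s (pvMarkerIndex.getD m [])) s).contains k)
      = (s.contains k || tm.any (fun m => (pvMarkerIndex.getD m []).contains k)) := by
  induction tm generalizing s with
  | nil => simp
  | cons m ms ih =>
      simp only [List.foldl_cons]
      rw [ih, pv_update_contains]
      simp [Bool.or_assoc]

-- first-match lookup in an assoc list with distinct keys, read column-wise:
-- getD m [] contains k  iff  m is among the keys whose row contains k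
theorem pv_assoc_contains (l : List (String × List String)) (m k : String)
    (h : (l.map Prod.fst).Nodup) :
    (((PySem.Dict.mk l).getD m []).contains k)
      = ((l.filter (fun p => p.2.contains k)).map Prod.fst).contains m := by
  induction l with
  | nil => simp [PySem.Dict.getD, PySem.Dict.get?]
  | cons p rest ih =>
      obtain ⟨a, v⟩ := p
      simp only [List.map_cons, List.nodup_cons] at h
      obtain ⟨ha, hrest⟩ := h
      simp only [PySem.Dict.getD, PySem.Dict.get?_mk_cons, List.filter_cons]
      by_cases hm : a = m
      · subst hm
        simp only [beq_self_eq_true, if_true, Option.getD_some]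
        by_cases hv : k ∈ v
        · have hv' : v.contains k = true := by simpa [List.contains_iff_mem] using hv
          simp only [if_true, hv']
          symm
          simp
        · have hv' : v.contains k = false := by
            simpa [Bool.eq_false_iff, List.contains_iff_mem] using hv
          have hnot : a ∉ (rest.filter (fun p => p.2.contains k)).map Prod.fst := by
            intro hmem
            rcases List.mem_map.mp hmem with ⟨q, hq, hq2⟩
            exact ha (hq2 ▸ List.mem_map_of_mem (List.mem_of_mem_filter hq))
          simp only [hv']
          symm
          exact Bool.eq_false_iff.mpr (by simpa [List.contains_iff_mem] using hnot)
      · have hm' : ¬ m = a := fun h => hm h.symm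
        have hbeq : (a == m) = false := beq_eq_false_iff_ne.mpr hm
        rw [hbeq]
        simp only [Bool.false_eq_true, if_false]
        rw [← PySem.Dict.getD, ih hrest]
        by_cases hv : k ∈ v
        · have hv' : v.contains k = true := by simpa [List.contains_iff_mem] using hv
          simp only [hv', if_true, List.map_cons]
          apply Bool.eq_iff_iff.mpr
          simp only [List.contains_iff_mem, List.mem_cons]
          tauto
        · have hv' : v.contains k = false := by
            simpa [Bool.eq_false_iff, List.contains_iff_mem] using hv
          simp only [hv', Bool.false_eq_true, if_false]

-- each inverted-index column equals A's trigger set for that pack key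
theorem pv_row_foundation (m : String) :
    ((pvMarkerIndex.getD m []).contains "foundation") = (["strategy", "foundation"] : List String).contains m := by
  rw [show pvMarkerIndex = PySem.Dict.mk pvIndexList from rfl,
     pv_assoc_contains pvIndexList m "foundation" (by decide)]
  rfl

theorem pv_row_prelims_gs (m : String) :
    ((pvMarkerIndex.getD m []).contains "prelims_gs") = (["prelims", "polity", "history", "geography", "economy", "environment", "science", "pyq"] : List String).contains m := by
  rw [show pvMarkerIndex = PySem.Dict.mk pvIndexList from rfl,
     pv_assoc_contains pvIndexList m "prelims_gs" (by decide)]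
  rfl

theorem pv_row_csat (m : String) :
    ((pvMarkerIndex.getD m []).contains "csat") = (["csat"] : List String).contains m := by
  rw [show pvMarkerIndex = PySem.Dict.mk pvIndexList from rfl,
     pv_assoc_contains pvIndexList m "csat" (by decide)]
  rfl

theorem pv_row_essay (m : String) :
    ((pvMarkerIndex.getD m []).contains "essay") = (["essay"] : List String).contains m := by
  rw [show pvMarkerIndex = PySem.Dict.mk pvIndexList from rfl,
     pv_assoc_contains pvIndexList m "essay" (by decide)]
  rfl

theorem pv_row_gs1 (m : String) :
    ((pvMarkerIndex.getD m []).contains "gs1") = (["history", "geography", "society"] : List String).contains m := by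
  rw [show pvMarkerIndex = PySem.Dict.mk pvIndexList from rfl,
     pv_assoc_contains pvIndexList m "gs1" (by decide)]
  rfl

theorem pv_row_gs2 (m : String) :
    ((pvMarkerIndex.getD m []).contains "gs2") = (["polity", "governance", "international relations", "social justice"] : List String).contains m := by
  rw [show pvMarkerIndex = PySem.Dict.mk pvIndexList from rfl,
     pv_assoc_contains pvIndexList m "gs2" (by decide)]
  rfl

theorem pv_row_gs3 (m : String) :
    ((pvMarkerIndex.getD m []).contains "gs3") = (["economy", "environment", "science", "technology"] : List String).contains m := by
  rw [show pvMarkerIndex = PySem.Dict.mk pvIndexList from rfl,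
     pv_assoc_contains pvIndexList m "gs3" (by decide)]
  rfl

theorem pv_row_gs4 (m : String) :
    ((pvMarkerIndex.getD m []).contains "gs4") = (["ethics"] : List String).contains m := by
  rw [show pvMarkerIndex = PySem.Dict.mk pvIndexList from rfl,
     pv_assoc_contains pvIndexList m "gs4" (by decide)]
  rfl

theorem pv_row_answer_writing (m : String) :
    ((pvMarkerIndex.getD m []).contains "answer_writing") = (["answer writing", "mains"] : List String).contains m := by
  rw [show pvMarkerIndex = PySem.Dict.mk pvIndexList from rfl,
     pv_assoc_contains pvIndexList m "answer_writing" (by decide)]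
  rfl

theorem pv_row_interview (m : String) :
    ((pvMarkerIndex.getD m []).contains "interview") = (["interview"] : List String).contains m := by
  rw [show pvMarkerIndex = PySem.Dict.mk pvIndexList from rfl,
     pv_assoc_contains pvIndexList m "interview" (by decide)]
  rfl

theorem pv_row_optional (m : String) :
    ((pvMarkerIndex.getD m []).contains "optional") = (["optional"] : List String).contains m := by
  rw [show pvMarkerIndex = PySem.Dict.mk pvIndexList from rfl,
     pv_assoc_contains pvIndexList m "optional" (by decide)]
  rfl

-- ===== VERDICT (by name: the statement is the Claim_ definition above) =====
set_option maxHeartbeats 4000000 in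
theorem subject_pack_keys_for_task_py_spec : Claim_equal_subject_pack_keys_for_task_py := by
  intro tm _
  unfold Spec_subject_pack_keys_for_task_py
  unfold subject_pack_keys_for_task_py subject_pack_keys_for_task_py_alt pvPackOrder
  simp only [pv_ite_cond, List.filter_cons, List.filter_nil, pv_hit_contains,
    List.nil_append]
  simp only [show (PySem.Set.empty : PySem.Set String).contains = fun _ => false from rfl,
    Bool.false_or]
  simp only [pv_row_foundation, pv_row_prelims_gs, pv_row_csat, pv_row_essay, pv_row_gs1,
    pv_row_gs2, pv_row_gs3, pv_row_gs4, pv_row_answer_writing, pv_row_interview,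
    pv_row_optional, pv_any_singleton]
  generalize (tm.any fun m => (["strategy", "foundation"] : List String).contains m) = b1
  generalize (tm.any fun m => (["prelims", "polity", "history", "geography", "economy", "environment", "science", "pyq"] : List String).contains m) = b2
  generalize (tm.contains "csat") = b3
  generalize (tm.contains "essay") = b4
  generalize (tm.any fun m => (["history", "geography", "society"] : List String).contains m) = b5
  generalize (tm.any fun m => (["polity", "governance", "international relations", "social justice"] : List String).contains m) = b6
  generalize (tm.any fun m => (["economy", "environment", "science", "technology"] : List String).contains m) = b7
  generalize (tm.contains "ethics") = b8
  generalize (tm.any fun m => (["answer writing", "mains"] : List String).contains m) = b9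
  generalize (tm.contains "interview") = b10
  generalize (tm.contains "optional") = b11
  revert b1 b2 b3 b4 b5 b6 b7 b8 b9 b10 b11
  decide
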